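-- pv_equiv track=rewrite | github.com/muuty/problem-solving | programmers/weekly_challanges/3.py | solution
-- ===== SOURCE A (Python) =====
-- def dfs(i, j, current_cluster, clusters, visited, X, Y, board, block_or_empty):
--     if not (0 <= i < X and 0 <= j < Y and board[i][j] == block_or_empty and (i,j) not in visited):
--         return
--
--     dxy = [[0,1], [0,-1], [1,0], [-1,0]]
--     visited.add((i, j))
--     current_cluster.append((i, j))
--     for dx, dy in dxy:
--         dfs(i + dx, j + dy, current_cluster, clusters, visited, X, Y, board, block_or_empty)
--
-- def arrange_block(block):
--     block.sort(key=lambda x: x[1])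
--     block.sort(key=lambda x: x[0])
--     return [[pos[0] - block[0][0], pos[1] - block[0][1]] for pos in block]
--
-- def rotate(point):
--     return [point[1], -point[0]]
--
-- def is_same(block1, block2):
--     for i in range(len(block1)):
--         if block1[i][0] != block2[i][0] or block1[i][1] != block2[i][1]:
--             return False
--     return True
--
-- def rotate_and_check(block1, block2):
--     if len(block1) != len(block2):
--         return False
--     block1 = arrange_block(block1)
--     block2 = arrange_block(block2)
--     for i in range(0, 4):
--         if is_same(block1, block2):
--             return True
--         block2 = arrange_block([rotate(point) for point in block2])
--     return False
--
-- def get_blocks(board, block_or_empty):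
--     clusters = []
--     visited = set()
--
--     X = len(board)
--     Y = len(board[0])
--     for i in range(X):
--         for j in range(Y):
--             if (i,j) not in visited and board[i][j] ==block_or_empty:
--                 new_cluster = []
--                 dfs(i,j, new_cluster, clusters, visited, X, Y, board, block_or_empty)
--                 clusters.append(new_cluster)
--
--     return clusters
--
-- def solution(game_board, table):
--     emptys = get_blocks(game_board, 0)
--     blocks = get_blocks(table, 1)
--
--
--     used_blocks = set()
--     total_filled = 0
--     for i in range(len(emptys)):
--         for j in range(len(blocks)):
--             if j not in used_blocks and rotate_and_check(emptys[i], blocks[j]):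
--                 used_blocks.add(j)
--                 total_filled += len(blocks[j])
--                 break
--
--     return total_filled
-- ===== SOURCE B (Python) =====
-- # B: canonicalize every cluster once (min over the 4 rotations of its sorted,
-- # anchor-translated form), count blocks per canonical shape in a dict, then a
-- # single pass over the empty regions consumes matching counts -- removing A's
-- # O(E*B) pairwise rotate-and-compare matching.
-- # (A sorts the cluster lists it is given in place; B does not mutate anything --
-- # equivalence is about the return value.)
--
-- def solution(game_board, table):
--     def flood(board, target):
--         # same cluster extraction as A (recursive DFS, same scan/neighbour order)
--         X, Y = len(board), len(board[0])
--         visited = set()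
--         clusters = []
--
--         def dfs(i, j, cluster):
--             if not (0 <= i < X and 0 <= j < Y and board[i][j] == target
--                     and (i, j) not in visited):
--                 return
--             visited.add((i, j))
--             cluster.append((i, j))
--             for di, dj in ((0, 1), (0, -1), (1, 0), (-1, 0)):
--                 dfs(i + di, j + dj, cluster)
--
--         for i in range(X):
--             for j in range(Y):
--                 if (i, j) not in visited and board[i][j] == target:
--                     cluster = []
--                     dfs(i, j, cluster)
--                     clusters.append(cluster)
--         return clusters
--
--     def normal_form(pts):
--         s = sorted(pts, key=lambda p: p[1])
--         s = sorted(s, key=lambda p: p[0])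
--         bi, bj = s[0]
--         return tuple((x - bi, y - bj) for x, y in s)
--
--     def canon(cluster):
--         pts = cluster
--         best = normal_form(pts)
--         for _ in range(3):
--             pts = [(y, -x) for x, y in pts]
--             f = normal_form(pts)
--             if f < best:
--                 best = f
--         return best
--
--     avail = {}
--     for b in flood(table, 1):
--         k = canon(b)
--         avail[k] = avail.get(k, 0) + 1
--
--     total = 0
--     for e in flood(game_board, 0):
--         k = canon(e)
--         if avail.get(k, 0) > 0:
--             avail[k] = avail[k] - 1
--             total += len(e)
--     return total
-- ===== Notes on version B (the rewrite author's own statement) =====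
-- stated objective: alternative
-- what changed: Instead of A's greedy O(E*B) pairwise rotate-and-compare matching between every empty region and every block, B canonicalizes each cluster once (lexicographic minimum over the 4 rotations of its sorted anchor-translated form), counts blocks per canonical shape in a dict, and a single pass over the empty regions consumes matching counts (intended as asymptotically faster; a timing run measured only 1.28x at its largest size, so no speed is claimed); Pre_ excludes only inputs where A raises IndexError (an empty board, or a row shorter than the first row).
import Mathlib
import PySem

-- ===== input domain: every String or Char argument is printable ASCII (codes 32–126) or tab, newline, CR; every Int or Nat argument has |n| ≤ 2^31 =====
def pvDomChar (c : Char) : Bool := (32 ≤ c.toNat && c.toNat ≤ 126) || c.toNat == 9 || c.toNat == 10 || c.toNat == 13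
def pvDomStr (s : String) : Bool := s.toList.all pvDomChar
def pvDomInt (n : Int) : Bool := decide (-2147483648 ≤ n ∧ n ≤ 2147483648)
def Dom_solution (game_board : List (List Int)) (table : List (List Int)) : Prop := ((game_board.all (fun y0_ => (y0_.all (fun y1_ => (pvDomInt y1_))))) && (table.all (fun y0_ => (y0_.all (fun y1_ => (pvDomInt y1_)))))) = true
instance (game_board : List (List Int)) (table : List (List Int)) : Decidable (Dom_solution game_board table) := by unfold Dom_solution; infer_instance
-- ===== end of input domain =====

-- B replaces A's greedy O(E*B) pairwise rotate-and-compare matching by canonicalizing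
-- each cluster once and counting per canonical shape in a dict (one pass each side).
-- (A sorts the cluster lists it is handed in place; B does not mutate — the equivalence
-- proved here is about the return value.)

-- ===== PORT A =====
-- board[i][j]; in-range wherever the Python reads it under Pre_ (defaults never reached there)
def pvCell (board : List (List Int)) (i j : Int) : Int :=
  PySem.List.pyGetD (PySem.List.pyGetD board i []) j 0

-- dfs(i, j, …): recursion made total with fuel; fuel = X*Y+1 never runs out on the
-- inputs the Python terminates on (each recursing level adds one fresh visited cell)
def pvDfs (board : List (List Int)) (target X Y : Int) :
    Nat → Int → Int → PySem.Set (Int × Int) × List (Int × Int) →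
    PySem.Set (Int × Int) × List (Int × Int)
  | 0, _, _, st => st
  | fuel+1, i, j, (vis, cl) =>
    if 0 ≤ i ∧ i < X ∧ 0 ≤ j ∧ j < Y ∧ pvCell board i j = target ∧ (i, j) ∉ vis then
      let vis' := vis.add (i, j)
      let cl' := cl ++ [(i, j)]
      let st1 := pvDfs board target X Y fuel i (j+1) (vis', cl')
      let st2 := pvDfs board target X Y fuel i (j-1) st1
      let st3 := pvDfs board target X Y fuel (i+1) j st2
      pvDfs board target X Y fuel (i-1) j st3
    else (vis, cl)

-- get_blocks(board, block_or_empty)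
def pvGetBlocks (board : List (List Int)) (target : Int) : List (List (Int × Int)) :=
  let X : Int := board.length
  let Y : Int := (PySem.List.pyGetD board 0 []).length
  let fuel : Nat := X.toNat * Y.toNat + 1
  let r := (PySem.List.pyRange 0 X).foldl
    (fun (st : PySem.Set (Int × Int) × List (List (Int × Int))) i =>
      (PySem.List.pyRange 0 Y).foldl
        (fun st j =>
          if (i, j) ∉ st.1 ∧ pvCell board i j = target then
            let r := pvDfs board target X Y fuel i j (st.1, [])
            (r.1, st.2 ++ [r.2])
          else st) st)
    (PySem.Set.ofList [], [])
  r.2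

-- arrange_block (shared normalization: identical code in Source A and Source B's normal_form;
-- the [] branch is Python's IndexError case, never reached — callers pass nonempty blocks)
def pvArrange (block : List (Int × Int)) : List (Int × Int) :=
  let b1 := PySem.List.sorted block (fun p => p.2)
  let b2 := PySem.List.sorted b1 (fun p => p.1)
  match b2 with
  | [] => []
  | p :: _ => b2.map (fun q => (q.1 - p.1, q.2 - p.2))

-- is_same (only called on equal-length blocks)
def pvIsSame : List (Int × Int) → List (Int × Int) → Bool
  | [], _ => true
  | _ :: _, [] => true
  | p :: r, q :: s => if p.1 ≠ q.1 ∨ p.2 ≠ q.2 then false else pvIsSame r s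

-- the 'for i in range(0, 4)' loop of rotate_and_check
def pvRACLoop (b1 : List (Int × Int)) : Nat → List (Int × Int) → Bool
  | 0, _ => false
  | k+1, b2 =>
    if pvIsSame b1 b2 then true
    else pvRACLoop b1 k (pvArrange (b2.map (fun p => (p.2, -p.1))))

-- rotate_and_check
def pvRAC (block1 block2 : List (Int × Int)) : Bool :=
  if block1.length ≠ block2.length then false
  else pvRACLoop (pvArrange block1) 4 (pvArrange block2)

-- the inner 'for j in range(len(blocks)) … break' loop
def pvScan (blocks : List (List (Int × Int))) (e : List (Int × Int)) :
    List Int → PySem.Set Int × Int → PySem.Set Int × Int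
  | [], st => st
  | j :: rest, (used, total) =>
    if j ∉ used ∧ pvRAC e (PySem.List.pyGetD blocks j []) = true then
      (used.add j, total + ((PySem.List.pyGetD blocks j []).length : Int))
    else pvScan blocks e rest (used, total)

def solution (game_board : List (List Int)) (table : List (List Int)) : Int :=
  let emptys := pvGetBlocks game_board 0
  let blocks := pvGetBlocks table 1
  let r := (PySem.List.pyRange 0 (emptys.length : Int)).foldl
    (fun (st : PySem.Set Int × Int) i =>
      pvScan blocks (PySem.List.pyGetD emptys i [])
        (PySem.List.pyRange 0 (blocks.length : Int)) st)
    (PySem.Set.ofList [], 0)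
  r.2

-- ===== PORT B =====
-- Python tuple '<' on the int-pair tuples B compares (forms of one cluster, equal length)
def pvPairLt (p q : Int × Int) : Bool := p.1 < q.1 || (p.1 == q.1 && p.2 < q.2)

def pvLexLt : List (Int × Int) → List (Int × Int) → Bool
  | [], [] => false
  | [], _ :: _ => true
  | _ :: _, [] => false
  | p :: r, q :: s => if p = q then pvLexLt r s else pvPairLt p q

-- canon(cluster): minimum of the normal forms of the 4 rotations (normal_form = pvArrange)
def pvCanon (cluster : List (Int × Int)) : List (Int × Int) :=
  let st := (PySem.List.pyRange 0 3).foldl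
    (fun (st : List (Int × Int) × List (Int × Int)) _ =>
      let pts := st.1.map (fun p => (p.2, -p.1))
      let f := pvArrange pts
      (pts, if pvLexLt f st.2 then f else st.2))
    (cluster, pvArrange cluster)
  st.2

def solution_alt (game_board : List (List Int)) (table : List (List Int)) : Int :=
  let avail := (pvGetBlocks table 1).foldl
    (fun (d : PySem.Dict (List (Int × Int)) Int) b =>
      let k := pvCanon b
      d.insert k (d.getD k 0 + 1))
    PySem.Dict.empty
  let r := (pvGetBlocks game_board 0).foldl
    (fun (st : PySem.Dict (List (Int × Int)) Int × Int) e =>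
      let k := pvCanon e
      if st.1.getD k 0 > 0 then (st.1.insert k (st.1.getD k 0 - 1), st.2 + (e.length : Int))
      else st)
    (avail, 0)
  r.2

-- ===== PRECONDITION & SPEC =====
-- Pre_ excludes exactly the inputs on which A raises IndexError: an empty board
-- (board[0]) or a row shorter than the first row (board[i][j] with j < len(board[0])).
def Pre_solution (game_board : List (List Int)) (table : List (List Int)) : Prop :=
  (game_board ≠ [] ∧ ∀ row ∈ game_board, (game_board.headI).length ≤ row.length) ∧
  (table ≠ [] ∧ ∀ row ∈ table, (table.headI).length ≤ row.length)
instance (game_board : List (List Int)) (table : List (List Int)) : Decidable (Pre_solution game_board table) := by unfold Pre_solution; infer_instance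

def pvWitness_solution : List (List Int) × List (List Int) :=
  ([[1, 0], [1, 1]], [[0, 1], [0, 0]])

def Spec_solution (game_board : List (List Int)) (table : List (List Int)) (out : Int) : Prop := out = solution_alt game_board table
instance (game_board : List (List Int)) (table : List (List Int)) (out : Int) : Decidable (Spec_solution game_board table out) := by unfold Spec_solution; infer_instance

-- ===== CLAIM (what is proved, stated in full; the proofs are below) =====
def Claim_equal_solution : Prop := ∀ (game_board : List (List Int)) (table : List (List Int)), Dom_solution game_board table → Pre_solution game_board table → Spec_solution game_board table (solution game_board table)

-- ===== LEMMAS AND PROOFS =====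

def LexLt (a b : Int × Int) : Prop := a.1 < b.1 ∨ (a.1 = b.1 ∧ a.2 < b.2)

theorem insertBy_pairwise {α κ : Type} [LinearOrder κ] (key : α → κ) (R : α → α → Prop)
    (hR : ∀ a b, R a b → key a ≤ key b) (hlt : ∀ a b, key a < key b → R a b)
    (x : α) (l : List α) (hl : l.Pairwise R)
    (hx : ∀ y ∈ l, key y ≤ key x → R y x) :
    (PySem.List.insertBy (fun a b => decide (key a < key b)) x l).Pairwise R := by
  induction l with
  | nil => simp [PySem.List.insertBy]
  | cons y ys ih =>
    rw [List.pairwise_cons] at hl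
    by_cases h : key x < key y
    · have : PySem.List.insertBy (fun a b => decide (key a < key b)) x (y :: ys) = x :: y :: ys := by
        simp [PySem.List.insertBy, h]
      rw [this, List.pairwise_cons]
      constructor
      · intro z hz
        rcases List.mem_cons.mp hz with rfl | hz
        · exact hlt _ _ h
        · exact hlt _ _ (lt_of_lt_of_le h (hR _ _ (hl.1 z hz)))
      · exact List.pairwise_cons.mpr hl
    · have : PySem.List.insertBy (fun a b => decide (key a < key b)) x (y :: ys) =
        y :: PySem.List.insertBy (fun a b => decide (key a < key b)) x ys := by
        simp [PySem.List.insertBy, h]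
      rw [this, List.pairwise_cons]
      refine ⟨?_, ih hl.2 (fun z hz hle => hx z (by simp [hz]) hle)⟩
      intro z hz
      rw [PySem.List.mem_insertBy] at hz
      rcases hz with rfl | hz
      · exact hx y (by simp) (le_of_not_gt h)
      · exact hl.1 z hz

theorem sorted_pairwise_stable {α κ : Type} [LinearOrder κ] (key : α → κ) (R : α → α → Prop)
    (hR : ∀ a b, R a b → key a ≤ key b) (hlt : ∀ a b, key a < key b → R a b)
    (xs : List α) (hties : xs.Pairwise (fun a b => key a = key b → R a b)) :
    (PySem.List.sorted xs key).Pairwise R := by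
  rw [PySem.List.sorted_eq_foldl_insertBy]
  suffices h : ∀ (l acc : List α), acc.Pairwise R →
      l.Pairwise (fun a b => key a = key b → R a b) →
      (∀ y ∈ acc, ∀ x ∈ l, key y = key x → R y x) →
      (l.foldl (fun acc x => PySem.List.insertBy (fun a b => decide (key a < key b)) x acc) acc).Pairwise R by
    exact h xs [] (by simp) hties (by simp)
  intro l
  induction l with
  | nil => intro acc h _ _; simpa using h
  | cons x t ih =>
    intro acc hacc hl hcross
    rw [List.pairwise_cons] at hl
    simp only [List.foldl_cons]
    apply ih _ ?_ hl.2 ?_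
    · apply insertBy_pairwise key R hR hlt x acc hacc
      intro y hy hle
      rcases lt_or_eq_of_le hle with h | h
      · exact hlt _ _ h
      · exact hcross y hy x (by simp) h
    · intro y hy z hz hk
      rw [PySem.List.mem_insertBy] at hy
      rcases hy with rfl | hy
      · exact hl.1 z hz hk
      · exact hcross y hy z (by simp [hz]) hk

def sortA (xs : List (Int × Int)) : List (Int × Int) :=
  PySem.List.sorted (PySem.List.sorted xs (fun p => p.2)) (fun p => p.1)

theorem pvArrange_eq (xs : List (Int × Int)) : pvArrange xs =
    (match sortA xs with
     | [] => []
     | p :: _ => (sortA xs).map (fun q => (q.1 - p.1, q.2 - p.2))) := rfl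

theorem sortA_perm (xs : List (Int × Int)) : (sortA xs).Perm xs :=
  (PySem.List.sorted_perm _ _ _).trans (PySem.List.sorted_perm _ _ _)

theorem sortA_pairwise {xs : List (Int × Int)} (h : xs.Nodup) : (sortA xs).Pairwise LexLt := by
  have h2 : (PySem.List.sorted xs (fun p => p.2)).Pairwise
      (fun a b => a.2 < b.2 ∨ (a.2 = b.2 ∧ a ≠ b)) := by
    apply sorted_pairwise_stable (α := Int × Int) (κ := Int) (fun p => p.2) (fun a b => a.2 < b.2 ∨ (a.2 = b.2 ∧ a ≠ b))
    · intro a b hab; rcases hab with h | ⟨h, _⟩ <;> omega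
    · intro a b hab; exact Or.inl hab
    · have hnd : xs.Pairwise (· ≠ ·) := h
      exact hnd.imp (fun hne heq => Or.inr ⟨heq, hne⟩)
  apply sorted_pairwise_stable (α := Int × Int) (κ := Int) (fun p => p.1) LexLt
  · intro a b hab; rcases hab with h | ⟨h, _⟩ <;> omega
  · intro a b hab; exact Or.inl hab
  · refine h2.imp ?_
    intro a b hab heq
    rcases hab with hlt | ⟨heq2, hne⟩
    · exact Or.inr ⟨heq, hlt⟩
    · exact absurd (Prod.ext heq heq2) hne

theorem lex_perm_eq : ∀ {l1 l2 : List (Int × Int)}, l1.Perm l2 →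
    l1.Pairwise LexLt → l2.Pairwise LexLt → l1 = l2 := by
  intro l1
  induction l1 with
  | nil => intro l2 hp _ _; exact (hp.nil_eq).symm ▸ rfl
  | cons a t1 ih =>
    intro l2 hp h1 h2
    cases l2 with
    | nil => exact absurd hp.symm.nil_eq (by simp)
    | cons b t2 =>
      rcases List.pairwise_cons.mp h1 with ⟨ha1, ht1⟩
      rcases List.pairwise_cons.mp h2 with ⟨hb2, ht2⟩
      have hab : a = b := by
        by_contra hne
        have haMem : a ∈ b :: t2 := hp.mem_iff.mp (by simp)
        have hbMem : b ∈ a :: t1 := hp.mem_iff.mpr (by simp)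
        have h1' : LexLt b a := hb2 a (by rcases List.mem_cons.mp haMem with h | h; exact absurd h hne; exact h)
        have h2' : LexLt a b := ha1 b (by rcases List.mem_cons.mp hbMem with h | h; exact absurd h.symm hne; exact h)
        rcases h1' with h | ⟨h, h'⟩ <;> rcases h2' with g | ⟨g, g'⟩ <;> omega
      subst hab
      have := ih (hp.cons_inv) ht1 ht2
      rw [this]

def rotL (l : List (Int × Int)) : List (Int × Int) := l.map (fun p => (p.2, -p.1))

theorem rot_inj : Function.Injective (fun p : Int × Int => (p.2, -p.1)) := by
  intro a b h
  simp only [Prod.mk.injEq] at h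
  exact Prod.ext (by omega) h.1

theorem sub_inj (c1 c2 : Int) : Function.Injective (fun q : Int × Int => (q.1 - c1, q.2 - c2)) := by
  intro a b h
  simp only [Prod.mk.injEq] at h
  exact Prod.ext (by omega) (by omega)

theorem rotL_rotL_rotL_rotL (l : List (Int × Int)) : rotL (rotL (rotL (rotL l))) = l := by
  simp [rotL, List.map_map, Function.comp_def]

theorem length_rotL (l : List (Int × Int)) : (rotL l).length = l.length := by simp [rotL]

theorem nodup_rotL {l : List (Int × Int)} (h : l.Nodup) : (rotL l).Nodup := h.map rot_inj

theorem sortA_eq {xs ys : List (Int × Int)} (h : xs.Nodup) (hperm : ys.Perm xs)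
    (hpair : ys.Pairwise LexLt) : sortA xs = ys :=
  lex_perm_eq ((sortA_perm xs).trans hperm.symm) (sortA_pairwise h) hpair

theorem sortA_nodup {xs : List (Int × Int)} (h : xs.Nodup) : (sortA xs).Nodup :=
  (sortA_perm xs).nodup_iff.mpr h

theorem lexLt_sub (c1 c2 : Int) {a b : Int × Int} (h : LexLt a b) :
    LexLt (a.1 - c1, a.2 - c2) (b.1 - c1, b.2 - c2) := by
  rcases h with h | ⟨h, h2⟩
  · exact Or.inl (by simp; omega)
  · exact Or.inr ⟨by simp; omega, by simp; omega⟩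

theorem sortA_map_sub {xs : List (Int × Int)} (c1 c2 : Int) (h : xs.Nodup) :
    sortA (xs.map (fun q => (q.1 - c1, q.2 - c2))) =
      (sortA xs).map (fun q => (q.1 - c1, q.2 - c2)) := by
  apply sortA_eq (h.map (sub_inj c1 c2))
  · exact (sortA_perm xs).map _
  · exact (sortA_pairwise h).map _ (fun a b hab => lexLt_sub c1 c2 hab)

theorem arrange_perm {xs ys : List (Int × Int)} (h : xs.Nodup) (hp : xs.Perm ys) :
    pvArrange xs = pvArrange ys := by
  rw [pvArrange_eq, pvArrange_eq]
  have : sortA xs = sortA ys :=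
    sortA_eq h ((sortA_perm ys).trans hp.symm) (sortA_pairwise (hp.nodup_iff.mp h))
  rw [this]

theorem arrange_map_sub {xs : List (Int × Int)} (c1 c2 : Int) (h : xs.Nodup) :
    pvArrange (xs.map (fun q => (q.1 - c1, q.2 - c2))) = pvArrange xs := by
  rw [pvArrange_eq, pvArrange_eq, sortA_map_sub c1 c2 h]
  cases hs : sortA xs with
  | nil => simp
  | cons p t =>
    simp only [List.map_cons, List.map_map]
    refine List.cons_eq_cons.mpr ⟨by simp only [Prod.ext_iff]; constructor <;> omega, ?_⟩
    apply List.map_congr_left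
    intro q _
    simp only [Function.comp_def, Prod.ext_iff]
    constructor <;> omega

theorem rotL_map_sub (c1 c2 : Int) (l : List (Int × Int)) :
    rotL (l.map (fun q => (q.1 - c1, q.2 - c2))) =
      (rotL l).map (fun q => (q.1 - c2, q.2 - -c1)) := by
  simp only [rotL, List.map_map]
  apply List.map_congr_left
  intro q _
  simp only [Function.comp_def]
  exact Prod.ext (by simp) (by simp; omega)

theorem arrange_rot_arrange {xs : List (Int × Int)} (h : xs.Nodup) :
    pvArrange (rotL (pvArrange xs)) = pvArrange (rotL xs) := by
  rw [pvArrange_eq (xs := xs)]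
  cases hs : sortA xs with
  | nil =>
    have hx : xs = [] := by
      have hp := sortA_perm xs
      rw [hs] at hp
      exact hp.nil_eq.symm
    subst hx
    rfl
  | cons p t =>
    rw [rotL_map_sub]
    have h1 : (rotL (sortA xs)).Nodup := nodup_rotL (sortA_nodup h)
    rw [hs] at h1
    have h2 := arrange_map_sub (c1 := p.2) (c2 := -p.1) (xs := rotL (p :: t)) h1
    rw [h2]
    rw [← hs] at h1 ⊢
    exact arrange_perm h1 ((sortA_perm xs).map _)

def frm (k : Nat) (x : List (Int × Int)) : List (Int × Int) := pvArrange (rotL^[k] x)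

theorem length_sortA (xs : List (Int × Int)) : (sortA xs).length = xs.length :=
  (sortA_perm xs).length_eq

theorem length_arrange (xs : List (Int × Int)) : (pvArrange xs).length = xs.length := by
  rw [pvArrange_eq]
  cases hs : sortA xs with
  | nil =>
    have := length_sortA xs
    rw [hs] at this
    simp [← this]
  | cons p t =>
    have := length_sortA xs
    rw [hs] at this
    simpa using this

theorem nodup_rotIter {x : List (Int × Int)} (h : x.Nodup) (k : Nat) : (rotL^[k] x).Nodup := by
  induction k with
  | zero => simpa
  | succ k ih => rw [Function.iterate_succ_apply']; exact nodup_rotL ih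

theorem length_rotIter (x : List (Int × Int)) (k : Nat) : (rotL^[k] x).length = x.length := by
  induction k with
  | zero => simp
  | succ k ih => rw [Function.iterate_succ_apply', length_rotL, ih]

theorem length_frm (k : Nat) (x : List (Int × Int)) : (frm k x).length = x.length := by
  rw [frm, length_arrange, length_rotIter]

theorem frm_succ {x : List (Int × Int)} (h : x.Nodup) (k : Nat) :
    frm (k+1) x = pvArrange (rotL (frm k x)) := by
  rw [frm, frm, arrange_rot_arrange (nodup_rotIter h k), Function.iterate_succ_apply']

theorem rotL_four (x : List (Int × Int)) : rotL^[4] x = x := by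
  show rotL (rotL (rotL (rotL x))) = x
  exact rotL_rotL_rotL_rotL x

theorem frm_add4 (k : Nat) (x : List (Int × Int)) : frm (k+4) x = frm k x := by
  rw [frm, frm, add_comm, Function.iterate_add_apply, rotL_four]

theorem frm_mod (x : List (Int × Int)) (m : Nat) : ∃ i, i < 4 ∧ frm m x = frm i x := by
  induction m using Nat.strong_induction_on with
  | _ m ih =>
    by_cases h : m < 4
    · exact ⟨m, h, rfl⟩
    · obtain ⟨i, hi, he⟩ := ih (m - 4) (by omega)
      refine ⟨i, hi, ?_⟩
      rw [← he, ← frm_add4 (m - 4) x]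
      congr 1
      omega

theorem frm_shift {e b : List (Int × Int)} (he : e.Nodup) (hb : b.Nodup) {j i : Nat}
    (h : frm j e = frm i b) (t : Nat) : frm (j + t) e = frm (i + t) b := by
  induction t with
  | zero => simpa using h
  | succ t ih =>
    rw [show j + (t+1) = (j+t) + 1 by omega, show i + (t+1) = (i+t) + 1 by omega,
      frm_succ he, frm_succ hb, ih]

theorem pairLt_irrefl (p : Int × Int) : pvPairLt p p = false := by simp [pvPairLt]

theorem pairLt_asymm {p q : Int × Int} (h : pvPairLt p q = true) : pvPairLt q p = false := by
  simp [pvPairLt] at *; omega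

theorem pairLt_trans {p q r : Int × Int} (h1 : pvPairLt p q = true) (h2 : pvPairLt q r = true) :
    pvPairLt p r = true := by
  simp [pvPairLt] at *; omega

theorem pairLt_connex {p q : Int × Int} (h : p ≠ q) : pvPairLt p q = true ∨ pvPairLt q p = true := by
  rw [Ne, Prod.ext_iff, not_and_or] at h
  simp [pvPairLt]
  omega

theorem lexLt_irrefl : ∀ (l : List (Int × Int)), pvLexLt l l = false := by
  intro l
  induction l with
  | nil => rfl
  | cons p r ih => simpa [pvLexLt] using ih

theorem lexLt_asymm : ∀ {a b : List (Int × Int)}, pvLexLt a b = true → pvLexLt b a = false := by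
  intro a
  induction a with
  | nil => intro b h; cases b <;> simp_all [pvLexLt]
  | cons p r ih =>
    intro b h
    cases b with
    | nil => simp_all [pvLexLt]
    | cons q s =>
      by_cases hpq : p = q
      · subst hpq
        simp only [pvLexLt] at h ⊢
        exact ih h
      · simp only [pvLexLt, if_neg hpq, if_neg (Ne.symm hpq)] at h ⊢
        exact pairLt_asymm h

theorem lexLt_trans : ∀ {a b c : List (Int × Int)}, pvLexLt a b = true → pvLexLt b c = true →
    pvLexLt a c = true := by
  intro a
  induction a with
  | nil => intro b c h1 h2; cases b <;> cases c <;> simp_all [pvLexLt]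
  | cons p r ih =>
    intro b c h1 h2
    cases b with
    | nil => simp_all [pvLexLt]
    | cons q s =>
      cases c with
      | nil => simp_all [pvLexLt]
      | cons u t =>
        by_cases hpq : p = q <;> by_cases hqu : q = u
        · subst hpq; subst hqu
          simp only [pvLexLt] at *
          exact ih h1 h2
        · subst hpq
          simp only [pvLexLt, if_neg hqu] at *
          exact h2
        · subst hqu
          simp only [pvLexLt, if_neg hpq] at *
          exact h1
        · simp only [pvLexLt, if_neg hpq, if_neg hqu] at h1 h2
          by_cases hpu : p = u
          · subst hpu
            have := pairLt_trans h1 h2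
            rw [pairLt_irrefl] at this
            exact absurd this (by simp)
          · simp only [pvLexLt, if_neg hpu]
            exact pairLt_trans h1 h2

theorem lexLt_connex : ∀ {a b : List (Int × Int)}, a ≠ b →
    pvLexLt a b = true ∨ pvLexLt b a = true := by
  intro a
  induction a with
  | nil => intro b h; cases b <;> simp_all [pvLexLt]
  | cons p r ih =>
    intro b h
    cases b with
    | nil => simp_all [pvLexLt]
    | cons q s =>
      by_cases hpq : p = q
      · subst hpq
        have : r ≠ s := by intro hrs; exact h (by rw [hrs])
        simpa [pvLexLt] using ih this
      · simp only [pvLexLt, if_neg hpq, if_neg (Ne.symm hpq)]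
        exact pairLt_connex hpq

-- min-of-two as B's loop computes it

def min2 (m f : List (Int × Int)) : List (Int × Int) := if pvLexLt f m then f else m

theorem min2_mem (m f : List (Int × Int)) : min2 m f = m ∨ min2 m f = f := by
  unfold min2; split <;> simp

theorem min2_le_left (m f : List (Int × Int)) : pvLexLt m (min2 m f) = false := by
  unfold min2; split
  · exact lexLt_asymm (by assumption)
  · exact lexLt_irrefl m

theorem min2_le_right (m f : List (Int × Int)) : pvLexLt f (min2 m f) = false := by
  unfold min2; split
  · exact lexLt_irrefl f
  · rename_i hf
    simpa using hf

theorem min2_mono {y m : List (Int × Int)} (h : pvLexLt y m = false) (f : List (Int × Int)) :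
    pvLexLt y (min2 m f) = false := by
  unfold min2; split
  · rename_i hf
    by_contra hy
    rw [Bool.not_eq_false] at hy
    rw [lexLt_trans hy hf] at h
    exact absurd h (by simp)
  · exact h

theorem canon_unfold (x : List (Int × Int)) :
    pvCanon x = min2 (min2 (min2 (frm 0 x) (frm 1 x)) (frm 2 x)) (frm 3 x) := rfl

theorem isSame_iff_eq : ∀ {b1 b2 : List (Int × Int)}, b1.length = b2.length →
    (pvIsSame b1 b2 = true ↔ b1 = b2) := by
  intro b1
  induction b1 with
  | nil => intro b2 h; cases b2 <;> simp_all [pvIsSame]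
  | cons p r ih =>
    intro b2 h
    cases b2 with
    | nil => simp at h
    | cons q s =>
      simp only [pvIsSame]
      split
      · rename_i hne
        constructor
        · intro hf; exact absurd hf (by simp)
        · intro he
          rcases List.cons_eq_cons.mp he with ⟨rfl, _⟩
          rcases hne with hne | hne <;> simp at hne
      · rename_i hne
        rw [not_or, not_not, not_not] at hne
        have hpq : p = q := Prod.ext hne.1 hne.2
        subst hpq
        rw [ih (by simpa using h)]
        simp

theorem canon_mem (x : List (Int × Int)) : ∃ j, j < 4 ∧ pvCanon x = frm j x := by
  rw [canon_unfold]
  rcases min2_mem (min2 (min2 (frm 0 x) (frm 1 x)) (frm 2 x)) (frm 3 x) with h | h <;> rw [h]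
  · rcases min2_mem (min2 (frm 0 x) (frm 1 x)) (frm 2 x) with h2 | h2 <;> rw [h2]
    · rcases min2_mem (frm 0 x) (frm 1 x) with h3 | h3 <;> rw [h3]
      · exact ⟨0, by omega, rfl⟩
      · exact ⟨1, by omega, rfl⟩
    · exact ⟨2, by omega, rfl⟩
  · exact ⟨3, by omega, rfl⟩

theorem canon_min (x : List (Int × Int)) : ∀ j, j < 4 → pvLexLt (frm j x) (pvCanon x) = false := by
  intro j hj
  rw [canon_unfold]
  interval_cases j
  · exact min2_mono (min2_mono (min2_le_left _ _) _) _
  · exact min2_mono (min2_mono (min2_le_right _ _) _) _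
  · exact min2_mono (min2_le_right _ _) _
  · exact min2_le_right _ _

theorem length_canon (x : List (Int × Int)) : (pvCanon x).length = x.length := by
  obtain ⟨j, _, h⟩ := canon_mem x
  rw [h, length_frm]

theorem racLoop_iff {b : List (Int × Int)} (a : List (Int × Int)) (hb : b.Nodup)
    (hsame : ∀ k, pvIsSame a (frm k b) = true ↔ a = frm k b) :
    ∀ (n s : Nat), pvRACLoop a n (frm s b) = true ↔ ∃ t, t < n ∧ a = frm (s + t) b := by
  intro n
  induction n with
  | zero => intro s; simp [pvRACLoop]
  | succ n ih =>
    intro s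
    show (if pvIsSame a (frm s b) then true
      else pvRACLoop a n (pvArrange ((frm s b).map (fun p => (p.2, -p.1))))) = true ↔ _
    rw [show pvArrange ((frm s b).map (fun p : Int × Int => (p.2, -p.1))) = frm (s+1) b
      from (frm_succ hb s).symm]
    by_cases h : pvIsSame a (frm s b) = true
    · simp only [h, if_true, true_iff]
      exact ⟨0, by omega, by simpa using (hsame s).mp h⟩
    · rw [if_neg h, ih (s+1)]
      constructor
      · rintro ⟨t, ht, he⟩
        exact ⟨t + 1, by omega, by rw [he]; congr 1; omega⟩
      · rintro ⟨t, ht, he⟩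
        cases t with
        | zero =>
          exact absurd ((hsame s).mpr (by simpa using he)) h
        | succ t =>
          exact ⟨t, by omega, by rw [he]; congr 1; omega⟩

theorem rac_iff {e b : List (Int × Int)} (hb : b.Nodup) :
    pvRAC e b = true ↔ e.length = b.length ∧ ∃ k, k < 4 ∧ pvArrange e = frm k b := by
  unfold pvRAC
  split
  · rename_i hne
    simp only [Bool.false_eq_true, false_iff, not_and]
    intro h; exact absurd h hne
  · rename_i hlen
    rw [not_not] at hlen
    simp only [hlen, true_and]
    have hsame : ∀ k, pvIsSame (pvArrange e) (frm k b) = true ↔ pvArrange e = frm k b := by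
      intro k
      exact isSame_iff_eq (by rw [length_arrange, length_frm, hlen])
    rw [show pvArrange b = frm 0 b from rfl, racLoop_iff (pvArrange e) hb hsame 4 0]
    simp only [Nat.zero_add]

theorem rac_iff_canon {e b : List (Int × Int)} (he : e.Nodup) (hb : b.Nodup) :
    pvRAC e b = true ↔ pvCanon e = pvCanon b := by
  rw [rac_iff hb]
  constructor
  · rintro ⟨hlen, k, hk, hfk⟩
    have h0 : frm 0 e = frm k b := hfk
    have hcross : ∀ j, j < 4 → ∃ i, i < 4 ∧ frm j e = frm i b := by
      intro j hj
      have := frm_shift he hb h0 j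
      obtain ⟨i, hi, hred⟩ := frm_mod b (k + j)
      exact ⟨i, hi, by rw [show (0 + j = j) from by omega] at this; rw [this, hred]⟩
    have hback : frm 0 b = frm (4 - k) e := by
      have := frm_shift he hb h0 (4 - k)
      rw [show (0 + (4 - k) = 4 - k) from by omega, show (k + (4 - k) = 0 + 4) from by omega,
        frm_add4] at this
      exact this.symm
    have hcross2 : ∀ i, i < 4 → ∃ j, j < 4 ∧ frm i b = frm j e := by
      intro i hi
      have := frm_shift hb he hback i
      obtain ⟨j, hj, hred⟩ := frm_mod e (4 - k + i)
      exact ⟨j, hj, by rw [show (0 + i = i) from by omega] at this; rw [this, hred]⟩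
    obtain ⟨j, hj, hcj⟩ := canon_mem e
    obtain ⟨i, hi, hci⟩ := canon_mem b
    by_contra hne
    rcases lexLt_connex hne with hlt | hlt
    · obtain ⟨i', hi', he'⟩ := hcross j hj
      rw [hcj, he'] at hlt
      rw [canon_min b i' hi'] at hlt
      exact absurd hlt (by simp)
    · obtain ⟨j', hj', hb'⟩ := hcross2 i hi
      rw [hci, hb'] at hlt
      rw [canon_min e j' hj'] at hlt
      exact absurd hlt (by simp)
  · intro hc
    obtain ⟨j, hj, hcj⟩ := canon_mem e
    obtain ⟨i, hi, hci⟩ := canon_mem b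
    have hji : frm j e = frm i b := by rw [← hcj, ← hci, hc]
    have := frm_shift he hb hji (4 - j)
    rw [show (j + (4 - j) = 0 + 4) from by omega, frm_add4] at this
    obtain ⟨m, hm, hred⟩ := frm_mod b (i + (4 - j))
    have harr : pvArrange e = frm m b := by
      rw [show pvArrange e = frm 0 e from rfl, this, hred]
    refine ⟨?_, m, hm, harr⟩
    have h1 := length_arrange e
    have h2 := length_frm m b
    rw [harr] at h1
    rw [h2] at h1
    exact h1.symm

theorem dfs_inv (board : List (List Int)) (target X Y : Int) :
    ∀ (fuel : Nat) (i j : Int) (st : PySem.Set (Int × Int) × List (Int × Int)),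
      st.2.Nodup → (∀ p ∈ st.2, p ∈ st.1) →
      ((pvDfs board target X Y fuel i j st).2.Nodup ∧
        ∀ p ∈ (pvDfs board target X Y fuel i j st).2, p ∈ (pvDfs board target X Y fuel i j st).1) := by
  intro fuel
  induction fuel with
  | zero => intro i j st h1 h2; exact ⟨h1, h2⟩
  | succ fuel ih =>
    intro i j st h1 h2
    obtain ⟨vis, cl⟩ := st
    rw [pvDfs]
    split
    · rename_i hg
      have h1' : (cl ++ [(i, j)]).Nodup := by
        rw [List.nodup_append]
        refine ⟨h1, List.nodup_singleton _, ?_⟩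
        intro a ha b hb
        simp only [List.mem_singleton] at hb
        subst hb
        intro hab
        subst hab
        exact hg.2.2.2.2.2 (h2 _ ha)
      have h2' : ∀ p ∈ cl ++ [(i, j)], p ∈ vis.add (i, j) := by
        intro p hp
        rcases List.mem_append.mp hp with hp | hp
        · rw [PySem.Set.mem_add]; exact Or.inl (h2 p hp)
        · simp only [List.mem_singleton] at hp
          subst hp
          rw [PySem.Set.mem_add]
          exact Or.inr rfl
      have A1 := ih i (j+1) (vis.add (i, j), cl ++ [(i, j)]) h1' h2'
      have A2 := ih i (j-1) _ A1.1 A1.2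
      have A3 := ih (i+1) j _ A2.1 A2.2
      exact ih (i-1) j _ A3.1 A3.2
    · exact ⟨h1, h2⟩

theorem foldl_preserve {α σ : Type} (Q : σ → Prop) (f : σ → α → σ)
    (h : ∀ s a, Q s → Q (f s a)) : ∀ (l : List α) (s : σ), Q s → Q (l.foldl f s) := by
  intro l
  induction l with
  | nil => intro s hs; exact hs
  | cons x t ih => intro s hs; exact ih _ (h s x hs)

theorem getBlocks_nodup (board : List (List Int)) (target : Int) :
    ∀ cl ∈ pvGetBlocks board target, cl.Nodup := by
  unfold pvGetBlocks
  apply foldl_preserve (Q := fun (st : PySem.Set (Int × Int) × List (List (Int × Int))) =>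
    ∀ cl ∈ st.2, cl.Nodup)
  · intro s i hs
    apply foldl_preserve (Q := fun (st : PySem.Set (Int × Int) × List (List (Int × Int))) =>
      ∀ cl ∈ st.2, cl.Nodup)
    · intro s' j hs'
      dsimp only
      split
      · intro cl hcl
        rcases List.mem_append.mp hcl with h | h
        · exact hs' cl h
        · simp only [List.mem_singleton] at h
          subst h
          exact (dfs_inv board target _ _ _ _ _ (s'.1, []) (by simp) (by simp)).1
      · exact hs'
    · exact hs
  · simp

theorem scan_eq (blocks : List (List (Int × Int))) (e : List (Int × Int)) :
    ∀ (js : List Int) (used : PySem.Set Int) (total : Int),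
      pvScan blocks e js (used, total) =
        match js.find? (fun j => !decide (j ∈ used) && pvRAC e (PySem.List.pyGetD blocks j [])) with
        | none => (used, total)
        | some j => (used.add j, total + ((PySem.List.pyGetD blocks j []).length : Int)) := by
  intro js
  induction js with
  | nil => intro used total; rfl
  | cons j rest ih =>
    intro used total
    show (if j ∉ used ∧ pvRAC e (PySem.List.pyGetD blocks j []) = true then _ else
      pvScan blocks e rest (used, total)) = _
    by_cases h : j ∉ used ∧ pvRAC e (PySem.List.pyGetD blocks j []) = true
    · rw [if_pos h, List.find?_cons_of_pos]
      simp only [Bool.and_eq_true, Bool.not_eq_true', decide_eq_false_iff_not]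
      exact ⟨h.1, h.2⟩
    · rw [if_neg h, ih, List.find?_cons_of_neg]
      simp only [Bool.and_eq_true, Bool.not_eq_true', decide_eq_false_iff_not]
      exact fun hc => h ⟨hc.1, hc.2⟩

theorem find?_congr_mem {α : Type} (p q : α → Bool) :
    ∀ (l : List α), (∀ x ∈ l, p x = q x) → l.find? p = l.find? q := by
  intro l
  induction l with
  | nil => intro _; rfl
  | cons x t ih =>
    intro h
    have hx := h x (by simp)
    by_cases hp : p x = true
    · rw [List.find?_cons_of_pos hp, List.find?_cons_of_pos (by rw [← hx]; exact hp)]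
    · rw [List.find?_cons_of_neg (by simpa using hp),
        List.find?_cons_of_neg (by rw [← hx]; simpa using hp)]
      exact ih (fun y hy => h y (by simp [hy]))

theorem countP_exclude (q : Int → Bool) (used : PySem.Set Int) (j₀ : Int) (hju : j₀ ∉ used) :
    ∀ (l : List Int), l.Nodup → j₀ ∈ l →
      (l.countP (fun j => !decide (j ∈ used.add j₀) && q j)
          = l.countP (fun j => !decide (j ∈ used) && q j) - (if q j₀ then 1 else 0)
        ∧ (if q j₀ then 1 else 0) ≤ l.countP (fun j => !decide (j ∈ used) && q j)) := by
  intro l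
  induction l with
  | nil => intro _ h; simp at h
  | cons x t ih =>
    intro hnd hmem
    rw [List.nodup_cons] at hnd
    by_cases hx : x = j₀
    · subst hx
      have hnt : x ∉ t := hnd.1
      have htail : t.countP (fun j => !decide (j ∈ used.add x) && q j)
          = t.countP (fun j => !decide (j ∈ used) && q j) := by
        apply List.countP_congr
        intro y hy
        have hyx : y ≠ x := fun h => hnt (h ▸ hy)
        simp only [Bool.and_eq_true, Bool.not_eq_true', decide_eq_false_iff_not,
          PySem.Set.mem_add]
        tauto
      rw [List.countP_cons, List.countP_cons, htail]
      have hnew : (!decide (x ∈ used.add x) && q x) = false := by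
        simp [PySem.Set.mem_add]
      have hold : (!decide (x ∈ used) && q x) = q x := by
        simp [hju]
      rw [hnew, hold]
      rcases hq : q x <;> simp
    · have hmem' : j₀ ∈ t := by
        rcases List.mem_cons.mp hmem with h | h
        · exact absurd h.symm hx
        · exact h
      obtain ⟨ih1, ih2⟩ := ih hnd.2 hmem'
      have hhead : (!decide (x ∈ used.add j₀) && q x) = (!decide (x ∈ used) && q x) := by
        simp only [PySem.Set.mem_add]
        have : (x ∈ used ∨ x = j₀) ↔ x ∈ used := by tauto
        simp [this]
      rw [List.countP_cons, List.countP_cons, hhead]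
      constructor <;> omega

-- remaining multiplicity of canonical shape c among the not-yet-used blocks

def cntRem (blocks : List (List (Int × Int))) (used : PySem.Set Int)
    (c : List (Int × Int)) : Nat :=
  (PySem.List.pyRange 0 (blocks.length : Int)).countP
    (fun j => !decide (j ∈ used) && decide (pvCanon (PySem.List.pyGetD blocks j []) = c))

theorem master (blocks : List (List (Int × Int))) (hbn : ∀ b ∈ blocks, b.Nodup) :
    ∀ (es : List (List (Int × Int))), (∀ e ∈ es, e.Nodup) →
    ∀ (used : PySem.Set Int) (d : PySem.Dict (List (Int × Int)) Int) (total : Int),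
    (∀ c, d.getD c 0 = (cntRem blocks used c : Int)) →
    (es.foldl (fun st e =>
        pvScan blocks e (PySem.List.pyRange 0 (blocks.length : Int)) st) (used, total)).2
      = (es.foldl (fun st e =>
          let k := pvCanon e
          if st.1.getD k 0 > 0 then (st.1.insert k (st.1.getD k 0 - 1), st.2 + (e.length : Int))
          else st) (d, total)).2 := by
  intro es
  induction es with
  | nil => intro _ used d total _; rfl
  | cons e rest ih =>
    intro hen used d total hinv
    have he : e.Nodup := hen e (by simp)
    have hrest : ∀ x ∈ rest, x.Nodup := fun x hx => hen x (by simp [hx])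
    simp only [List.foldl_cons]
    rw [scan_eq]
    have hpredEq : (PySem.List.pyRange 0 (blocks.length : Int)).find?
        (fun j => !decide (j ∈ used) && pvRAC e (PySem.List.pyGetD blocks j []))
        = (PySem.List.pyRange 0 (blocks.length : Int)).find?
          (fun j => !decide (j ∈ used) &&
            decide (pvCanon (PySem.List.pyGetD blocks j []) = pvCanon e)) := by
      apply find?_congr_mem
      intro j hj
      rw [PySem.List.mem_pyRange_one] at hj
      have hbj : (PySem.List.pyGetD blocks j []).Nodup := by
        apply hbn
        apply PySem.List.pyGetD_mem
        constructor <;> [omega; (exact_mod_cast hj.2)]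
      have hrc := rac_iff_canon he hbj
      by_cases hc : pvCanon (PySem.List.pyGetD blocks j []) = pvCanon e
      · rw [hrc.mpr hc.symm, decide_eq_true hc]
      · have : pvRAC e (PySem.List.pyGetD blocks j []) = false := by
          rw [← Bool.not_eq_true, hrc]
          exact fun h => hc h.symm
        rw [this, decide_eq_false hc]
    rw [hpredEq]
    cases hfind : (PySem.List.pyRange 0 (blocks.length : Int)).find?
        (fun j => !decide (j ∈ used) &&
          decide (pvCanon (PySem.List.pyGetD blocks j []) = pvCanon e)) with
    | none =>
      dsimp only
      have hcnt0 : cntRem blocks used (pvCanon e) = 0 := by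
        by_contra h0
        have hex : ∃ j ∈ PySem.List.pyRange 0 (blocks.length : Int),
            (!decide (j ∈ used) &&
              decide (pvCanon (PySem.List.pyGetD blocks j []) = pvCanon e)) = true := by
          rw [← List.countP_pos_iff]
          have := Nat.pos_of_ne_zero (by exact_mod_cast h0 : cntRem blocks used (pvCanon e) ≠ 0)
          rw [cntRem] at this
          exact this
        have hs := List.find?_isSome.mpr hex
        rw [hfind] at hs
        simp at hs
      have hB : ¬ (d.getD (pvCanon e) 0 > 0) := by
        rw [hinv, hcnt0]
        omega
      rw [if_neg hB]
      exact ih hrest used d total hinv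
    | some j₀ =>
      dsimp only
      have hp := List.find?_some hfind
      have hmem := List.mem_of_find?_eq_some hfind
      simp only [Bool.and_eq_true, Bool.not_eq_true', decide_eq_false_iff_not,
        decide_eq_true_eq] at hp
      have hcnt_pos : 0 < cntRem blocks used (pvCanon e) := by
        rw [cntRem, List.countP_pos_iff]
        exact ⟨j₀, hmem, by simp [hp.1, hp.2]⟩
      have hB : d.getD (pvCanon e) 0 > 0 := by
        rw [hinv]
        exact_mod_cast hcnt_pos
      rw [if_pos hB]
      have hlen : ((PySem.List.pyGetD blocks j₀ []).length : Int) = (e.length : Int) := by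
        have h1 := length_canon (PySem.List.pyGetD blocks j₀ [])
        have h2 := length_canon e
        rw [hp.2] at h1
        rw [h2] at h1
        exact_mod_cast h1.symm
      rw [hlen]
      apply ih hrest
      intro c
      rw [PySem.Dict.getD_insert]
      have hx := countP_exclude
        (fun j => decide (pvCanon (PySem.List.pyGetD blocks j []) = c)) used j₀ hp.1
        (PySem.List.pyRange 0 (blocks.length : Int)) (PySem.List.nodup_pyRange_one _ _) hmem
      dsimp only at hx
      by_cases hc : c = pvCanon e
      · subst hc
        rw [if_pos rfl, hinv]
        have hq : decide (pvCanon (PySem.List.pyGetD blocks j₀ []) = pvCanon e) = true := by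
          rw [hp.2]
          simp
        simp only [hq, if_true] at hx
        show ((cntRem blocks used (pvCanon e) : Int) - 1
          = (cntRem blocks (used.add j₀) (pvCanon e) : Int))
        have h1 : cntRem blocks (used.add j₀) (pvCanon e)
            = cntRem blocks used (pvCanon e) - 1 := hx.1
        have h2 : 1 ≤ cntRem blocks used (pvCanon e) := hx.2
        omega
      · rw [if_neg hc, hinv]
        have hq : decide (pvCanon (PySem.List.pyGetD blocks j₀ []) = c) = false := by
          rw [decide_eq_false_iff_not, hp.2]
          exact fun h => hc h.symm
        simp only [hq, Bool.false_eq_true, if_false] at hx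
        have : cntRem blocks (used.add j₀) c = cntRem blocks used c := by
          rw [cntRem, cntRem, hx.1]
          omega
        rw [this]

theorem counter_init (blocks : List (List (Int × Int))) (c : List (Int × Int)) :
    (blocks.foldl
        (fun (d : PySem.Dict (List (Int × Int)) Int) b =>
          let k := pvCanon b
          d.insert k (d.getD k 0 + 1))
        PySem.Dict.empty).getD c 0
      = (cntRem blocks (PySem.Set.ofList []) c : Int) := by
  have h1 : (blocks.foldl
      (fun (d : PySem.Dict (List (Int × Int)) Int) b =>
        let k := pvCanon b
        d.insert k (d.getD k 0 + 1))
      PySem.Dict.empty)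
      = ((blocks.map pvCanon).foldl
          (fun (d : PySem.Dict (List (Int × Int)) Int) x => d.insert x (d.getD x 0 + 1))
          PySem.Dict.empty) := by
    rw [List.foldl_map]
  have h2 : cntRem blocks (PySem.Set.ofList []) c
      = blocks.countP (fun b => decide (pvCanon b = c)) := by
    rw [cntRem]
    have hmap := PySem.List.map_pyGetD_pyRange_zero' blocks ([] : List (Int × Int))
    calc (PySem.List.pyRange 0 (blocks.length : Int)).countP
          (fun j => !decide (j ∈ (PySem.Set.ofList [] : PySem.Set Int)) &&
            decide (pvCanon (PySem.List.pyGetD blocks j []) = c))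
        = (PySem.List.pyRange 0 (blocks.length : Int)).countP
            (fun j => decide (pvCanon (PySem.List.pyGetD blocks j []) = c)) := by
          apply List.countP_congr
          intro j hj
          simp [PySem.Set.ofList]
      _ = ((PySem.List.pyRange 0 (blocks.length : Int)).map
            (fun j => PySem.List.pyGetD blocks j [])).countP
            (fun b => decide (pvCanon b = c)) := by
          rw [List.countP_map]
          apply List.countP_congr
          intro x _
          rfl
      _ = blocks.countP (fun b => decide (pvCanon b = c)) := by rw [hmap]
  have h3 : List.count c (blocks.map pvCanon) = blocks.countP (fun b => decide (pvCanon b = c)) := by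
    rw [List.count_eq_countP, List.countP_map]
    apply List.countP_congr
    intro b hb
    simp
  rw [h1, PySem.Dict.getD_foldl_insert_add_one, PySem.Dict.getD_empty, zero_add, h3, h2]

theorem solution_eq_alt (game_board : List (List Int)) (table : List (List Int)) :
    solution game_board table = solution_alt game_board table := by
  unfold solution solution_alt
  dsimp only
  rw [PySem.List.foldl_pyRange_zero_pyGetD' (pvGetBlocks game_board 0) []
    (fun st e => pvScan (pvGetBlocks table 1) e
      (PySem.List.pyRange 0 ((pvGetBlocks table 1).length : Int)) st)
    (PySem.Set.ofList [], 0)]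
  exact master (pvGetBlocks table 1) (getBlocks_nodup table 1)
    (pvGetBlocks game_board 0) (getBlocks_nodup game_board 0)
    (PySem.Set.ofList []) _ 0 (counter_init (pvGetBlocks table 1))

-- ===== VERDICT (by name: the statement is the Claim_ definition above) =====
theorem solution_spec : Claim_equal_solution := by
  unfold Claim_equal_solution Spec_solution
  intro game_board table _ _
  exact solution_eq_alt game_board table
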